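-- pv_equiv track=rewrite | github.com/tom-clayton/Mopho-Controller | synth_controller/synths/packing_functions.py | mopho_unpack
-- ===== SOURCE A (Python) =====
-- def mopho_unpack(data):
--     """Unpack midi patch dump data into tuple of parameter values as ints.
--     Packing format from page 44 of Manual"""
--     unpacked_data = []
--
--     for i in range(0, len(data), 8):
--         chunk = data[i: i+8]
--         packing_byte = chunk[0]
--         mask = 0x01
--         for byte in chunk[1:]:
--             unpacked_data.append(((packing_byte & mask) << 7) | byte)
--             mask <<= 1
--
--     return tuple(unpacked_data)
-- ===== SOURCE B (Python) =====
-- def mopho_unpack(data):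
--     """Unpack midi patch dump data into tuple of parameter values as ints.
--     Single flat pass: index i%8==0 is the chunk's packing byte (skipped);
--     otherwise the packing byte is data[i - i % 8] and the bit is i % 8 - 1."""
--     return tuple(
--         ((data[i - i % 8] & (1 << (i % 8 - 1))) << 7) | byte
--         for i, byte in enumerate(data)
--         if i % 8
--     )
-- ===== Notes on version B (the rewrite author's own statement) =====
-- stated objective: alternative
-- what changed: Replaced A's nested loop (outer loop over 8-byte chunk slices, inner loop carrying a doubling mask) by a single flat filtered pass over enumerate(data) that skips packing bytes (i % 8 == 0) and recovers each byte's packing byte as data[i - i % 8] and its bit as 1 << (i % 8 - 1).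
import Mathlib
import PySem

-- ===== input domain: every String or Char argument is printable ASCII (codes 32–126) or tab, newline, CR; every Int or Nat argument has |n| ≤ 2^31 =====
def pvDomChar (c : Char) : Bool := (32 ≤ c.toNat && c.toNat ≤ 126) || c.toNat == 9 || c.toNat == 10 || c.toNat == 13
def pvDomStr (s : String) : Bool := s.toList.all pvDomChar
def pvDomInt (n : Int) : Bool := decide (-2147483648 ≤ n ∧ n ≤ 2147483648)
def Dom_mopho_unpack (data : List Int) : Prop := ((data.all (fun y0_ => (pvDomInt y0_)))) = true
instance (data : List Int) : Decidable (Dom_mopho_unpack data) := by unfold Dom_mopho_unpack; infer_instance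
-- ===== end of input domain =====

-- B replaces A's nested chunk loop by one flat pass over enumerate(data) using modular
-- arithmetic to locate each chunk's packing byte (objective: alternative decomposition).

-- ===== PORT A =====
-- literal port of A: outer loop over range(0, len(data), 8); per chunk an inner fold
-- carrying (unpacked_data, mask), mask doubling each step.
def mopho_unpack (data : List Int) : List Int :=
  (PySem.List.pyRange 0 (data.length : Int) 8).foldl
    (fun (acc : List Int) (i : Int) =>
      let chunk := PySem.List.slice data (some i) (some (i + 8))
      let packing_byte := PySem.List.pyGetD chunk 0 0
      ((PySem.List.slice chunk (some 1) none).foldl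
        (fun (st : List Int × Int) (byte : Int) =>
          (st.1 ++ [PySem.Int.bor ((PySem.Int.band packing_byte st.2) <<< (7 : Nat)) byte],
           st.2 <<< (1 : Nat)))
        (acc, 1)).1)
    []

-- ===== PORT B =====
-- literal port of B: one filtered comprehension over enumerate(data).
def mopho_unpack_alt (data : List Int) : List Int :=
  (PySem.List.enumerate data).filterMap (fun p =>
    if PySem.Int.mod p.1 8 ≠ 0 then
      some (PySem.Int.bor
        ((PySem.Int.band (PySem.List.pyGetD data (p.1 - PySem.Int.mod p.1 8) 0)
          ((1 : Int) <<< (PySem.Int.mod p.1 8 - 1).toNat)) <<< (7 : Nat))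
        p.2)
    else none)

-- ===== PRECONDITION & SPEC =====
def Spec_mopho_unpack (data : List Int) (out : List Int) : Prop := out = mopho_unpack_alt data
instance (data : List Int) (out : List Int) : Decidable (Spec_mopho_unpack data out) := by unfold Spec_mopho_unpack; infer_instance

-- ===== CLAIM (what is proved, stated in full; the proofs are below) =====
def Claim_equal_mopho_unpack : Prop := ∀ (data : List Int), Dom_mopho_unpack data → Spec_mopho_unpack data (mopho_unpack data)

-- ===== LEMMAS AND PROOFS =====

-- the per-chunk payload: masks 1, 2, 4, … applied to packing byte p
def mmChunk (p : Int) : List Int → Int → List Int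
  | [], _ => []
  | b :: bs, m => PySem.Int.bor ((PySem.Int.band p m) <<< (7 : Nat)) b :: mmChunk p bs (m <<< (1 : Nat))

-- reference chunk recursion both ports are reduced to
def refUnpack : List Int → List Int
  | [] => []
  | p :: rest => mmChunk p (rest.take 7) 1 ++ refUnpack (rest.drop 7)
termination_by l => l.length
decreasing_by simp

@[simp] theorem refUnpack_nil : refUnpack [] = [] := by rw [refUnpack.eq_def]

theorem refUnpack_cons (p : Int) (rest : List Int) :
    refUnpack (p :: rest) = mmChunk p (rest.take 7) 1 ++ refUnpack (rest.drop 7) := by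
  rw [refUnpack.eq_def]

-- A's fold body as a flat chunk function
def chunkF (data : List Int) (i : Int) : List Int :=
  let chunk := PySem.List.slice data (some i) (some (i + 8))
  mmChunk (PySem.List.pyGetD chunk 0 0) (PySem.List.slice chunk (some 1) none) 1

-- B's filterMap function
def gB (data : List Int) (p : Int × Int) : Option Int :=
  if PySem.Int.mod p.1 8 ≠ 0 then
    some (PySem.Int.bor
      ((PySem.Int.band (PySem.List.pyGetD data (p.1 - PySem.Int.mod p.1 8) 0)
        ((1 : Int) <<< (PySem.Int.mod p.1 8 - 1).toNat)) <<< (7 : Nat))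
      p.2)
  else none

theorem innerA (p : Int) (bs : List Int) : ∀ (acc : List Int) (m : Int),
    (bs.foldl
      (fun (st : List Int × Int) (byte : Int) =>
        (st.1 ++ [PySem.Int.bor ((PySem.Int.band p st.2) <<< (7 : Nat)) byte],
         st.2 <<< (1 : Nat)))
      (acc, m)).1 = acc ++ mmChunk p bs m := by
  induction bs with
  | nil => intro acc m; simp [mmChunk]
  | cons b bs ih => intro acc m; simp [List.foldl_cons, mmChunk, ih]

theorem pyRange8_nil (a b : Int) (h : b ≤ a) : PySem.List.pyRange a b 8 = [] := by
  rw [PySem.List.pyRange_of_pos _ _ (by norm_num)]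
  rw [if_neg (by omega)]
  simp

theorem pyRange8_cons (a b : Int) (h : a < b) :
    PySem.List.pyRange a b 8 = a :: PySem.List.pyRange (a + 8) b 8 := by
  rw [PySem.List.pyRange_of_pos _ _ (by norm_num), PySem.List.pyRange_of_pos _ _ (by norm_num)]
  rw [if_pos h]
  have hcount : ((b - a + 8 - 1) / 8).toNat
      = (if a + 8 < b then ((b - (a + 8) + 8 - 1) / 8).toNat else 0) + 1 := by
    split_ifs <;> omega
  rw [hcount, List.range_succ_eq_map]
  rw [List.map_cons, List.map_map]
  congr 1
  · simp
  · apply List.map_congr_left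
    intro k _
    simp [Function.comp]
    ring

theorem A_flat (data : List Int) :
    mopho_unpack data = (PySem.List.pyRange 0 (data.length : Int) 8).flatMap (chunkF data) := by
  unfold mopho_unpack
  have hfun : (fun (acc : List Int) (i : Int) =>
      let chunk := PySem.List.slice data (some i) (some (i + 8))
      let packing_byte := PySem.List.pyGetD chunk 0 0
      ((PySem.List.slice chunk (some 1) none).foldl
        (fun (st : List Int × Int) (byte : Int) =>
          (st.1 ++ [PySem.Int.bor ((PySem.Int.band packing_byte st.2) <<< (7 : Nat)) byte],
           st.2 <<< (1 : Nat)))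
        (acc, 1)).1)
      = fun (acc : List Int) (i : Int) => acc ++ chunkF data i := by
    funext acc i
    simp only [chunkF]
    exact innerA _ _ _ _
  rw [hfun, PySem.List.foldl_append_eq_flatMap]
  simp

theorem A_chunks (fuel : Nat) : ∀ (data rem : List Int) (c : Nat),
    rem.length ≤ fuel → data.drop (8 * c) = rem →
    (PySem.List.pyRange ((8 * c : Nat) : Int) (data.length : Int) 8).flatMap (chunkF data)
      = refUnpack rem := by
  induction fuel with
  | zero =>
    intro data rem c hlen hdrop
    have hrem : rem = [] := by cases rem <;> simp_all
    subst hrem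
    have hle : data.length ≤ 8 * c := List.drop_eq_nil_iff.mp hdrop
    rw [pyRange8_nil _ _ (by exact_mod_cast hle)]
    simp
  | succ n ih =>
    intro data rem c hlen hdrop
    cases rem with
    | nil =>
      have hle : data.length ≤ 8 * c := List.drop_eq_nil_iff.mp hdrop
      rw [pyRange8_nil _ _ (by exact_mod_cast hle)]
      simp
    | cons p rest =>
      have hlt : 8 * c < data.length := by
        by_contra hcon
        have : data.drop (8 * c) = [] := List.drop_eq_nil_iff.mpr (by omega)
        simp [this] at hdrop
      rw [pyRange8_cons _ _ (by exact_mod_cast hlt)]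
      rw [List.flatMap_cons]
      have hchunk : PySem.List.slice data (some ((8 * c : Nat) : Int)) (some (((8 * c : Nat) : Int) + 8))
          = p :: rest.take 7 := by
        have h8 : ((8 * c : Nat) : Int) + 8 = ((8 * c : Nat) : Int) + ((8 : Nat) : Int) := by push_cast; ring
        rw [h8, PySem.List.slice_natCast_add, hdrop]
        simp
      have hF : chunkF data ((8 * c : Nat) : Int) = mmChunk p (rest.take 7) 1 := by
        simp only [chunkF, hchunk, PySem.List.pyGetD_zero_cons, PySem.List.slice_from_one,
          List.tail_cons]
      rw [hF]
      have hnext : ((8 * c : Nat) : Int) + 8 = ((8 * (c + 1) : Nat) : Int) := by push_cast; ring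
      rw [hnext, ih data (rest.drop 7) (c + 1)
        (by simp only [List.length_cons] at hlen; simp only [List.length_drop]; omega)
        (by
          have : data.drop (8 * (c + 1)) = (data.drop (8 * c)).drop 8 := by
            rw [List.drop_drop]; ring_nf
          rw [this, hdrop]; simp)]
      rw [refUnpack_cons]

theorem B_inner (data : List Int) (p : Int) (c : Nat) (t : List Int) :
    ∀ (j : Nat), t.length + j ≤ 7 → PySem.List.pyGetD data ((8 * c : Nat) : Int) 0 = p →
    (PySem.List.enumerate t (((8 * c : Nat) : Int) + 1 + (j : Int))).filterMap (gB data)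
      = mmChunk p t ((1 : Int) <<< j) := by
  induction t with
  | nil => intro j _ _; simp [mmChunk, PySem.List.enumerate]
  | cons b bs ih =>
    intro j hj hp
    rw [PySem.List.enumerate_cons, List.filterMap_cons]
    have hj6 : j ≤ 6 := by simp at hj; omega
    have hm : PySem.Int.mod (((8 * c : Nat) : Int) + 1 + (j : Int)) 8 = 1 + (j : Int) := by
      simp [PySem.Int.mod, Int.fmod_eq_emod]
      omega
    have hgb : gB data ((((8 * c : Nat) : Int) + 1 + (j : Int)), b)
        = some (PySem.Int.bor ((PySem.Int.band p ((1 : Int) <<< j)) <<< (7 : Nat)) b) := by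
      simp only [gB, hm]
      rw [if_pos (by omega)]
      have hsub : ((8 * c : Nat) : Int) + 1 + (j : Int) - (1 + (j : Int)) = ((8 * c : Nat) : Int) := by ring
      have hexp : ((1 : Int) + (j : Int) - 1).toNat = j := by omega
      rw [hsub, hexp, hp]
    rw [hgb]
    have hst : (((8 * c : Nat) : Int) + 1 + (j : Int)) + 1
        = ((8 * c : Nat) : Int) + 1 + ((j + 1 : Nat) : Int) := by push_cast; ring
    rw [hst, ih (j + 1) (by simp at hj ⊢; omega) hp]
    have hmask : ((1 : Int) <<< j) <<< (1 : Nat) = (1 : Int) <<< (j + 1) := by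
      simp [Int.shiftLeft_eq]; ring
    simp [mmChunk, hmask]

theorem B_chunks (fuel : Nat) : ∀ (data rem : List Int) (c : Nat),
    rem.length ≤ fuel → data.drop (8 * c) = rem →
    (PySem.List.enumerate rem ((8 * c : Nat) : Int)).filterMap (gB data) = refUnpack rem := by
  induction fuel with
  | zero =>
    intro data rem c hlen hdrop
    have hrem : rem = [] := by cases rem <;> simp_all
    subst hrem
    simp [PySem.List.enumerate]
  | succ n ih =>
    intro data rem c hlen hdrop
    cases rem with
    | nil => simp [PySem.List.enumerate]
    | cons p rest =>
      rw [PySem.List.enumerate_cons]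
      have hg0 : gB data (((8 * c : Nat) : Int), p) = none := by
        simp [gB, PySem.Int.mod, Int.fmod_eq_emod]
      rw [List.filterMap_cons_none hg0]
      have hp : PySem.List.pyGetD data ((8 * c : Nat) : Int) 0 = p := by
        rw [PySem.List.pyGetD_natCast]
        have h0 : (data.drop (8 * c))[0]? = some p := by rw [hdrop]; rfl
        rw [List.getElem?_drop] at h0
        have h0' : data[8 * c]? = some p := by simpa using h0
        simp [List.getD, h0']
      have hsplit : rest = rest.take 7 ++ rest.drop 7 := (List.take_append_drop 7 rest).symm
      conv_lhs => rw [hsplit, PySem.List.enumerate_append, List.filterMap_append]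
      have hfirst : (PySem.List.enumerate (rest.take 7) (((8 * c : Nat) : Int) + 1)).filterMap (gB data)
          = mmChunk p (rest.take 7) 1 := by
        have h0 : ((8 * c : Nat) : Int) + 1 = ((8 * c : Nat) : Int) + 1 + ((0 : Nat) : Int) := by simp
        rw [h0, B_inner data p c (rest.take 7) 0 (by simp) hp]
        norm_num
      rw [hfirst, refUnpack_cons]
      congr 1
      cases hd : rest.drop 7 with
      | nil => simp [PySem.List.enumerate]
      | cons q qs =>
        rw [← hd]
        have h7 : 7 < rest.length := by
          by_contra hcon
          have hnil : rest.drop 7 = [] := List.drop_eq_nil_iff.mpr (by omega)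
          simp [hnil] at hd
        have hlen7 : (rest.take 7).length = 7 := by simp; omega
        have hstart : ((8 * c : Nat) : Int) + 1 + ((rest.take 7).length : Int)
            = ((8 * (c + 1) : Nat) : Int) := by rw [hlen7]; push_cast; ring
        rw [hstart]
        have hlen' : (rest.drop 7).length ≤ n := by
          simp only [List.length_cons] at hlen
          simp only [List.length_drop]
          omega
        have hdrop' : data.drop (8 * (c + 1)) = rest.drop 7 := by
          have hdd : data.drop (8 * (c + 1)) = (data.drop (8 * c)).drop 8 := by
            rw [List.drop_drop]; ring_nf
          rw [hdd, hdrop]; simp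
        exact ih data (rest.drop 7) (c + 1) hlen' hdrop' 

theorem alt_eq (data : List Int) :
    mopho_unpack_alt data = (PySem.List.enumerate data 0).filterMap (gB data) := rfl

-- ===== VERDICT (by name: the statement is the Claim_ definition above) =====
theorem mopho_unpack_spec : Claim_equal_mopho_unpack := by
  intro data _
  unfold Spec_mopho_unpack
  rw [A_flat, alt_eq, show ((0 : Int)) = ((8 * 0 : Nat) : Int) from by simp]
  rw [A_chunks data.length data data 0 le_rfl (by simp),
      B_chunks data.length data data 0 le_rfl (by simp)]
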